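-- pv_equiv track=rewrite | github.com/davidkleiven/PyPACE | pypace/constrainedPower.py | createSparseList
-- ===== SOURCE A (Python) =====
-- def createSparseList( bandwidth ):
--     basisList = []
--     for iz in range(-bandwidth,bandwidth):
--         for iy in range(-bandwidth,bandwidth):
--             if ( iz == 0 and iy == 0 ):
--                 for ix in range(0,bandwidth):
--                     basisList.append([ix,iy,iz])
--             else:
--                 for ix in range(-bandwidth,bandwidth):
--                     basisList.append([ix,iy,iz])
--     return basisList
-- ===== SOURCE B (Python) =====
-- def createSparseList(bandwidth):
--     # Build the full (2b)^3 cube in (iz, iy, ix) order, then splice out the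
--     # negative-ix prefix of the origin row (iz==0, iy==0) by index arithmetic.
--     cube = [[ix, iy, iz]
--             for iz in range(-bandwidth, bandwidth)
--             for iy in range(-bandwidth, bandwidth)
--             for ix in range(-bandwidth, bandwidth)]
--     side = 2 * bandwidth
--     start = (bandwidth * side + bandwidth) * side
--     return cube[:start] + cube[start + bandwidth:]
-- ===== Notes on version B (the rewrite author's own statement) =====
-- stated objective: alternative
-- what changed: B builds the full (2b)^3 cube once as a single flat comprehension with no conditionals, computes the start index of the origin row arithmetically, and splices out its negative-ix prefix with two list slices, whereas A branches between two differently-bounded innermost loops.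
import Mathlib
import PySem

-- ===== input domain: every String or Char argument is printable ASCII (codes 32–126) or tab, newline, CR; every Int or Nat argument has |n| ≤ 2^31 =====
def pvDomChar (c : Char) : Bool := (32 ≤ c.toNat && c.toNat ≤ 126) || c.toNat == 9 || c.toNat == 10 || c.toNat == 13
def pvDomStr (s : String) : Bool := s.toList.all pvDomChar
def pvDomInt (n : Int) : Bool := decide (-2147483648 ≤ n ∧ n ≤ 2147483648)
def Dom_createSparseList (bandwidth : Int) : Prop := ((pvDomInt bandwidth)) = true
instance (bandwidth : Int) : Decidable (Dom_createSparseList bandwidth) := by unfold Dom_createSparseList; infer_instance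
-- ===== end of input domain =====

-- B builds the full (2b)^3 cube once as a flat comprehension and removes the negative-ix
-- prefix of the origin row by index arithmetic and two slices (alternative decomposition).

-- ===== PORT A =====
def createSparseList (bandwidth : Int) : List (List Int) :=
  (PySem.List.pyRange (-bandwidth) bandwidth 1).foldl (fun acc iz =>
    (PySem.List.pyRange (-bandwidth) bandwidth 1).foldl (fun acc iy =>
      if iz = 0 ∧ iy = 0 then
        (PySem.List.pyRange 0 bandwidth 1).foldl (fun acc ix => acc ++ [[ix, iy, iz]]) acc
      else
        (PySem.List.pyRange (-bandwidth) bandwidth 1).foldl (fun acc ix => acc ++ [[ix, iy, iz]]) acc)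
      acc) []

-- ===== PORT B =====
def createSparseList_alt (bandwidth : Int) : List (List Int) :=
  let cube := (PySem.List.pyRange (-bandwidth) bandwidth 1).flatMap (fun iz =>
    (PySem.List.pyRange (-bandwidth) bandwidth 1).flatMap (fun iy =>
      (PySem.List.pyRange (-bandwidth) bandwidth 1).map (fun ix => [ix, iy, iz])))
  let side := 2 * bandwidth
  let start := (bandwidth * side + bandwidth) * side
  PySem.List.slice cube none (some start) ++ PySem.List.slice cube (some (start + bandwidth)) none

-- ===== PRECONDITION & SPEC =====
def Spec_createSparseList (bandwidth : Int) (out : List (List Int)) : Prop := out = createSparseList_alt bandwidth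
instance (bandwidth : Int) (out : List (List Int)) : Decidable (Spec_createSparseList bandwidth out) := by unfold Spec_createSparseList; infer_instance

-- ===== CLAIM (what is proved, stated in full; the proofs are below) =====
def Claim_equal_createSparseList : Prop := ∀ (bandwidth : Int), Dom_createSparseList bandwidth → Spec_createSparseList bandwidth (createSparseList bandwidth)

-- ===== LEMMAS AND PROOFS =====

-- shorthand for the triple builder
def pvRow (iy iz a b : Int) : List (List Int) :=
  (PySem.List.pyRange a b 1).map (fun ix => [ix, iy, iz])

-- A in closed (flatMap) form
theorem pvA_closed (b : Int) :
    createSparseList b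
      = (PySem.List.pyRange (-b) b 1).flatMap (fun iz =>
          (PySem.List.pyRange (-b) b 1).flatMap (fun iy =>
            if iz = 0 ∧ iy = 0 then pvRow iy iz 0 b else pvRow iy iz (-b) b)) := by
  unfold createSparseList
  have h1 : ∀ (iz : Int) (acc : List (List Int)),
      (PySem.List.pyRange (-b) b 1).foldl (fun acc iy =>
        if iz = 0 ∧ iy = 0 then
          (PySem.List.pyRange 0 b 1).foldl (fun acc ix => acc ++ [[ix, iy, iz]]) acc
        else
          (PySem.List.pyRange (-b) b 1).foldl (fun acc ix => acc ++ [[ix, iy, iz]]) acc) acc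
      = acc ++ (PySem.List.pyRange (-b) b 1).flatMap (fun iy =>
          if iz = 0 ∧ iy = 0 then pvRow iy iz 0 b else pvRow iy iz (-b) b) := by
    intro iz acc
    have hfun : (fun (acc : List (List Int)) (iy : Int) =>
        if iz = 0 ∧ iy = 0 then
          (PySem.List.pyRange 0 b 1).foldl (fun acc ix => acc ++ [[ix, iy, iz]]) acc
        else
          (PySem.List.pyRange (-b) b 1).foldl (fun acc ix => acc ++ [[ix, iy, iz]]) acc)
        = (fun acc iy => acc ++ (if iz = 0 ∧ iy = 0 then pvRow iy iz 0 b else pvRow iy iz (-b) b)) := by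
      funext acc iy
      by_cases h : iz = 0 ∧ iy = 0
      · rw [if_pos h, if_pos h, PySem.List.foldl_append_singleton_eq_map]; rfl
      · rw [if_neg h, if_neg h, PySem.List.foldl_append_singleton_eq_map]; rfl
    rw [hfun, PySem.List.foldl_append_eq_flatMap]
  have hfun2 : (fun (acc : List (List Int)) (iz : Int) =>
      (PySem.List.pyRange (-b) b 1).foldl (fun acc iy =>
        if iz = 0 ∧ iy = 0 then
          (PySem.List.pyRange 0 b 1).foldl (fun acc ix => acc ++ [[ix, iy, iz]]) acc
        else
          (PySem.List.pyRange (-b) b 1).foldl (fun acc ix => acc ++ [[ix, iy, iz]]) acc) acc)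
      = (fun acc iz => acc ++ (PySem.List.pyRange (-b) b 1).flatMap (fun iy =>
          if iz = 0 ∧ iy = 0 then pvRow iy iz 0 b else pvRow iy iz (-b) b)) := by
    funext acc iz; exact h1 iz acc
  rw [hfun2, PySem.List.foldl_append_eq_flatMap, List.nil_append]

-- splitting range(-b, b) at 0
theorem pvSplitR (b : Int) (hb : 0 < b) :
    PySem.List.pyRange (-b) b 1
      = PySem.List.pyRange (-b) 0 1 ++ (0 :: PySem.List.pyRange 1 b 1) := by
  have h0 : PySem.List.pyRange 0 b 1 = 0 :: PySem.List.pyRange 1 b 1 :=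
    PySem.List.pyRange_one_cons (by omega)
  rw [PySem.List.pyRange_one_append (-b) 0 b (by omega) (by omega), h0]

-- A, fully split at the origin row (iz = 0, iy = 0)
theorem pvA_split (b : Int) (hb : 0 < b) :
    createSparseList b
      = ((PySem.List.pyRange (-b) 0 1).flatMap (fun iz =>
            (PySem.List.pyRange (-b) b 1).flatMap (fun iy => pvRow iy iz (-b) b))
        ++ ((PySem.List.pyRange (-b) 0 1).flatMap (fun iy => pvRow iy 0 (-b) b)
        ++ (pvRow 0 0 0 b
        ++ ((PySem.List.pyRange 1 b 1).flatMap (fun iy => pvRow iy 0 (-b) b)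
        ++ (PySem.List.pyRange 1 b 1).flatMap (fun iz =>
            (PySem.List.pyRange (-b) b 1).flatMap (fun iy => pvRow iy iz (-b) b)))))) := by
  rw [pvA_closed]
  set G := fun (iz : Int) => (PySem.List.pyRange (-b) b 1).flatMap (fun iy =>
      if iz = 0 ∧ iy = 0 then pvRow iy iz 0 b else pvRow iy iz (-b) b) with hG
  conv_lhs => rw [pvSplitR b hb, List.flatMap_append, List.flatMap_cons]
  have hneg : (PySem.List.pyRange (-b) 0 1).flatMap G
      = (PySem.List.pyRange (-b) 0 1).flatMap (fun iz =>
          (PySem.List.pyRange (-b) b 1).flatMap (fun iy => pvRow iy iz (-b) b)) := by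
    refine List.flatMap_congr (fun iz hiz => ?_)
    have := PySem.List.mem_pyRange_one.mp hiz
    simp only [hG]
    exact List.flatMap_congr (fun iy _ => if_neg (by omega))
  have hpos : (PySem.List.pyRange 1 b 1).flatMap G
      = (PySem.List.pyRange 1 b 1).flatMap (fun iz =>
          (PySem.List.pyRange (-b) b 1).flatMap (fun iy => pvRow iy iz (-b) b)) := by
    refine List.flatMap_congr (fun iz hiz => ?_)
    have := PySem.List.mem_pyRange_one.mp hiz
    simp only [hG]
    exact List.flatMap_congr (fun iy _ => if_neg (by omega))
  have hzero : G 0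
      = (PySem.List.pyRange (-b) 0 1).flatMap (fun iy => pvRow iy 0 (-b) b)
        ++ (pvRow 0 0 0 b
        ++ (PySem.List.pyRange 1 b 1).flatMap (fun iy => pvRow iy 0 (-b) b)) := by
    simp only [hG]
    rw [pvSplitR b hb, List.flatMap_append, List.flatMap_cons]
    have h1 : (PySem.List.pyRange (-b) 0 1).flatMap (fun iy =>
        if (0:Int) = 0 ∧ iy = 0 then pvRow iy 0 0 b else pvRow iy 0 (-b) b)
        = (PySem.List.pyRange (-b) 0 1).flatMap (fun iy => pvRow iy 0 (-b) b) := by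
      refine List.flatMap_congr (fun iy hiy => ?_)
      have := PySem.List.mem_pyRange_one.mp hiy
      exact if_neg (by omega)
    have h2 : (PySem.List.pyRange 1 b 1).flatMap (fun iy =>
        if (0:Int) = 0 ∧ iy = 0 then pvRow iy 0 0 b else pvRow iy 0 (-b) b)
        = (PySem.List.pyRange 1 b 1).flatMap (fun iy => pvRow iy 0 (-b) b) := by
      refine List.flatMap_congr (fun iy hiy => ?_)
      have := PySem.List.mem_pyRange_one.mp hiy
      exact if_neg (by omega)
    simp only [true_and, if_true] at h1 h2 ⊢
    rw [h1, h2]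
  rw [hneg, hpos, hzero]
  simp

-- the cube of B, split the same way (origin full row decomposed into negative and nonnegative part)
theorem pvCube_split (b : Int) (hb : 0 < b) :
    (PySem.List.pyRange (-b) b 1).flatMap (fun iz =>
        (PySem.List.pyRange (-b) b 1).flatMap (fun iy => pvRow iy iz (-b) b))
      = (((PySem.List.pyRange (-b) 0 1).flatMap (fun iz =>
            (PySem.List.pyRange (-b) b 1).flatMap (fun iy => pvRow iy iz (-b) b))
          ++ (PySem.List.pyRange (-b) 0 1).flatMap (fun iy => pvRow iy 0 (-b) b))
        ++ (pvRow 0 0 (-b) 0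
        ++ (pvRow 0 0 0 b
        ++ ((PySem.List.pyRange 1 b 1).flatMap (fun iy => pvRow iy 0 (-b) b)
        ++ (PySem.List.pyRange 1 b 1).flatMap (fun iz =>
            (PySem.List.pyRange (-b) b 1).flatMap (fun iy => pvRow iy iz (-b) b)))))) := by
  set F := fun (iz : Int) => (PySem.List.pyRange (-b) b 1).flatMap (fun iy => pvRow iy iz (-b) b) with hF
  conv_lhs => rw [pvSplitR b hb, List.flatMap_append, List.flatMap_cons]
  have hzero : F 0
      = (PySem.List.pyRange (-b) 0 1).flatMap (fun iy => pvRow iy 0 (-b) b)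
        ++ ((pvRow 0 0 (-b) 0 ++ pvRow 0 0 0 b)
        ++ (PySem.List.pyRange 1 b 1).flatMap (fun iy => pvRow iy 0 (-b) b)) := by
    simp only [hF]
    rw [pvSplitR b hb, List.flatMap_append, List.flatMap_cons]
    have hrow00 : pvRow 0 0 (-b) b = pvRow 0 0 (-b) 0 ++ pvRow 0 0 0 b := by
      unfold pvRow
      rw [PySem.List.pyRange_one_append (-b) 0 b (by omega) (by omega), List.map_append]
    rw [hrow00]
  rw [hzero]
  simp

-- lengths of the building blocks
theorem pvRow_length (iy iz a b : Int) : (pvRow iy iz a b).length = (b - a).toNat := by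
  simp [pvRow, PySem.List.length_pyRange_one]

theorem pvPlane_length (iz a b c d : Int) :
    ((PySem.List.pyRange a b 1).flatMap (fun iy => pvRow iy iz c d)).length
      = (b - a).toNat * (d - c).toNat := by
  rw [List.length_flatMap]
  have : (PySem.List.pyRange a b 1).map (fun iy => (pvRow iy iz c d).length)
      = (PySem.List.pyRange a b 1).map (fun _ => (d - c).toNat) :=
    List.map_congr_left (fun x _ => pvRow_length x iz c d)
  rw [this, List.map_const', List.sum_replicate, smul_eq_mul, PySem.List.length_pyRange_one]

theorem pvBlock_length (a b lo hi c d : Int) :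
    ((PySem.List.pyRange a b 1).flatMap (fun iz =>
        (PySem.List.pyRange lo hi 1).flatMap (fun iy => pvRow iy iz c d))).length
      = (b - a).toNat * ((hi - lo).toNat * (d - c).toNat) := by
  rw [List.length_flatMap]
  have : (PySem.List.pyRange a b 1).map
        (fun iz => ((PySem.List.pyRange lo hi 1).flatMap (fun iy => pvRow iy iz c d)).length)
      = (PySem.List.pyRange a b 1).map (fun _ => (hi - lo).toNat * (d - c).toNat) :=
    List.map_congr_left (fun x _ => pvPlane_length x lo hi c d)
  rw [this, List.map_const', List.sum_replicate, smul_eq_mul, PySem.List.length_pyRange_one]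

-- the main equation
theorem pv_main (b : Int) : createSparseList b = createSparseList_alt b := by
  have halt : createSparseList_alt b
      = PySem.List.slice ((PySem.List.pyRange (-b) b 1).flatMap (fun iz =>
            (PySem.List.pyRange (-b) b 1).flatMap (fun iy => pvRow iy iz (-b) b)))
          none (some ((b * (2 * b) + b) * (2 * b)))
        ++ PySem.List.slice ((PySem.List.pyRange (-b) b 1).flatMap (fun iz =>
            (PySem.List.pyRange (-b) b 1).flatMap (fun iy => pvRow iy iz (-b) b)))
          (some ((b * (2 * b) + b) * (2 * b) + b)) none := rfl
  by_cases hb : b ≤ 0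
  · -- empty ranges: both sides are []
    rw [pvA_closed, halt, PySem.List.pyRange_one_eq_nil (by omega)]
    simp [PySem.List.slice]
  · have hb' : 0 < b := by omega
    rw [halt, pvCube_split b hb']
    set L1 := (PySem.List.pyRange (-b) 0 1).flatMap (fun iz =>
        (PySem.List.pyRange (-b) b 1).flatMap (fun iy => pvRow iy iz (-b) b))
      ++ (PySem.List.pyRange (-b) 0 1).flatMap (fun iy => pvRow iy 0 (-b) b) with hL1
    set T := pvRow 0 0 0 b
      ++ ((PySem.List.pyRange 1 b 1).flatMap (fun iy => pvRow iy 0 (-b) b)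
      ++ (PySem.List.pyRange 1 b 1).flatMap (fun iz =>
          (PySem.List.pyRange (-b) b 1).flatMap (fun iy => pvRow iy iz (-b) b))) with hT
    have hlenL1 : L1.length = ((b * (2 * b) + b) * (2 * b)).toNat := by
      obtain ⟨n, hn⟩ : ∃ n : Nat, b = (n : Int) := ⟨b.toNat, by omega⟩
      rw [hL1, List.length_append, pvBlock_length, pvPlane_length]
      subst hn
      have e1 : ((n:Int) - -(n:Int)).toNat = 2 * n := by omega
      have e2 : ((0:Int) - -(n:Int)).toNat = n := by omega
      have e3 : (((n:Int) * (2 * (n:Int)) + (n:Int)) * (2 * (n:Int)))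
          = (((n * (2 * n) + n) * (2 * n) : Nat) : Int) := by push_cast; ring
      rw [e1, e2, e3, Int.toNat_natCast]
      ring
    have hlenNeg : (pvRow 0 0 (-b) 0).length = b.toNat := by
      rw [pvRow_length]; omega
    rw [PySem.List.slice_to _ (by positivity), PySem.List.slice_from _ (by positivity)]
    have htake : List.take ((b * (2 * b) + b) * (2 * b)).toNat
        (L1 ++ (pvRow 0 0 (-b) 0 ++ T)) = L1 := by
      rw [← hlenL1, List.take_left]
    have hdrop : List.drop ((b * (2 * b) + b) * (2 * b) + b).toNat
        (L1 ++ (pvRow 0 0 (-b) 0 ++ T)) = T := by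
      have hre : L1 ++ (pvRow 0 0 (-b) 0 ++ T) = (L1 ++ pvRow 0 0 (-b) 0) ++ T := by simp
      have hlen2 : (L1 ++ pvRow 0 0 (-b) 0).length
          = ((b * (2 * b) + b) * (2 * b) + b).toNat := by
        rw [List.length_append, hlenL1, hlenNeg]
        have : (0:Int) ≤ (b * (2 * b) + b) * (2 * b) := by positivity
        omega
      rw [hre, ← hlen2, List.drop_left]
    rw [htake, hdrop, pvA_split b hb', hL1, hT]
    simp

-- ===== VERDICT (by name: the statement is the Claim_ definition above) =====
theorem createSparseList_spec : Claim_equal_createSparseList := by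
  intro b _
  unfold Spec_createSparseList
  exact pv_main b
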